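-- pv_equiv track=rewrite | github.com/biff-ai/gpt-magic | gpt/gpt.py | extract_code_and_text
-- ===== SOURCE A (Python) =====
-- def extract_code_and_text(response):
--     result = []
--     code_start = "```"
--     code_end = "```"
--     in_code_block = False
--     buffer = ""
--     code_buffer = ""
--     language = ""
--
--     while response:
--         if not in_code_block and response.startswith(code_start):
--             in_code_block = True
--             response = response[len(code_start):]
--             language_end = response.find("\n")
--             language = response[:language_end].strip()
--             response = response[language_end:]
--             buffer = buffer.strip()
--             if buffer:
--                 result.append(("markdown", buffer))
--                 buffer = ""
--         elif in_code_block and response.startswith(code_end):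
--             in_code_block = False
--             response = response[len(code_end):]
--             code_buffer = code_buffer.strip()
--             if code_buffer:
--                 result.append(("code", code_buffer))
--                 code_buffer = ""
--         else:
--             char = response[0]
--             response = response[1:]
--             if in_code_block:
--                 code_buffer += char
--             else:
--                 buffer += char
--
--     # Append the remaining text outside of the code blocks
--     buffer = buffer.strip()
--     if buffer:
--         result.append(("markdown", buffer))
--
--     return result
-- ===== SOURCE B (Python) =====
-- def extract_code_and_text(response):
--     result = []
--     while True:
--         j = response.find("```")
--         if j == -1:
--             tail = response.strip()
--             if tail:
--                 result.append(("markdown", tail))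
--             return result
--         md = response[:j].strip()
--         if md:
--             result.append(("markdown", md))
--         response = response[j + 3:]
--         k = response.find("\n")
--         if k == -1:
--             return result
--         response = response[k:]
--         c = response.find("```")
--         if c == -1:
--             return result
--         code = response[:c].strip()
--         if code:
--             result.append(("code", code))
--         response = response[c + 3:]
-- ===== Notes on version B (the rewrite author's own statement) =====
-- stated objective: faster
-- what changed: B replaces A's per-character scan (which rebuilds the remaining string with response[1:] at every step and grows buffers char by char) by a single pass that locates the ``` and newline delimiters with str.find and appends whole stripped substrings.
import Mathlib
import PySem

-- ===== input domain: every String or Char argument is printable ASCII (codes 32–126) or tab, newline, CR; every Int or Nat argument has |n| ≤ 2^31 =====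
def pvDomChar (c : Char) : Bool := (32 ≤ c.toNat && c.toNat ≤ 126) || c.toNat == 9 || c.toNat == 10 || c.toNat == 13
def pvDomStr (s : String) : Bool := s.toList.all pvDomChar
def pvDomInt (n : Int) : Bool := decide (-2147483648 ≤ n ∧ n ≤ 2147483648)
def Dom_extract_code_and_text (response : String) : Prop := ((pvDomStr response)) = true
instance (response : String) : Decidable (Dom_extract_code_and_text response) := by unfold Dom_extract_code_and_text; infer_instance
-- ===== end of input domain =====

-- B replaces A's per-character loop (which re-slices the whole remaining string at every step)
-- by jumps between delimiters located with str.find, appending whole substrings.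

-- ===== PORT A =====
-- shared literals and the strip-then-append flush patterns both Pythons contain verbatim
def pvFence : List Char := ['`', '`', '`']
def pvNewline : List Char := ['\n']

def pvMd (buf : List Char) (res : List (String × String)) : List (String × String) :=
  let b := PySem.Chars.strip buf
  if b = [] then res else res ++ [("markdown", String.ofList b)]

def pvCode (buf : List Char) (res : List (String × String)) : List (String × String) :=
  let b := PySem.Chars.strip buf
  if b = [] then res else res ++ [("code", String.ofList b)]

-- generic length facts used only for termination of the two loops
theorem pv_len_slice_le {α : Type} (xs : List α) (a : Int) :
    (PySem.List.slice xs (some a) none).length ≤ xs.length := by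
  rw [PySem.List.slice_some_none]
  simp [List.length_drop]

theorem pv_len_slice_lt (xs : List Char) (c : Int) (h0 : 0 ≤ c) (h3 : 3 ≤ xs.length) :
    (PySem.List.slice xs (some (c + 3)) none).length < xs.length := by
  simp only [PySem.List.slice_some_none, List.length_drop, PySem.List.clampIdx]
  rw [if_neg (by omega)]
  omega

theorem pv_len_slice_lt' (xs : List Char) (a : Int) (h : 1 ≤ PySem.List.clampIdx xs.length a) :
    (PySem.List.slice xs (some a) none).length < xs.length := by
  simp only [PySem.List.slice_some_none, List.length_drop]
  have h2 := PySem.List.clampIdx_le xs.length a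
  omega

theorem pv_clamp3 (c : Char) (rest : List Char) :
    1 ≤ PySem.List.clampIdx (c :: rest).length 3 := by
  simp only [PySem.List.clampIdx, List.length_cons]
  rw [if_neg (by omega)]
  omega

-- A's while loop, char by char; `resp.length` shrinks in every branch
def loopA (resp : List Char) (inCode : Bool) (buffer codeBuffer : List Char)
    (result : List (String × String)) : List (String × String) :=
  match resp with
  | [] => pvMd buffer result
  | c :: rest =>
    if _h1 : !inCode && PySem.Chars.startswith (c :: rest) pvFence then
      let resp1 := PySem.List.slice (c :: rest) (some 3) none
      let languageEnd := PySem.Chars.find resp1 pvNewline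
      let _language := PySem.Chars.strip (PySem.List.slice resp1 none (some languageEnd))
      loopA (PySem.List.slice resp1 (some languageEnd) none) true [] codeBuffer (pvMd buffer result)
    else if _h2 : inCode && PySem.Chars.startswith (c :: rest) pvFence then
      loopA (PySem.List.slice (c :: rest) (some 3) none) false buffer [] (pvCode codeBuffer result)
    else if inCode then
      loopA rest inCode buffer (codeBuffer ++ [c]) result
    else
      loopA rest inCode (buffer ++ [c]) codeBuffer result
termination_by resp.length
decreasing_by
  · exact lt_of_le_of_lt (pv_len_slice_le _ _) (pv_len_slice_lt' _ _ (pv_clamp3 c rest))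
  · exact pv_len_slice_lt' _ _ (pv_clamp3 c rest)
  · simp
  · simp

def extract_code_and_text (response : String) : List (String × String) :=
  loopA response.toList false [] [] []

-- ===== PORT B =====
-- B's while-True loop: find the next fence, flush the markdown before it, skip to the newline
-- ending the language line, find the closing fence, flush the code, continue after it.
def loopB (resp : List Char) (result : List (String × String)) : List (String × String) :=
  let j := PySem.Chars.find resp pvFence
  if hj : j = -1 then
    pvMd resp result
  else
    let result1 := pvMd (PySem.List.slice resp none (some j)) result
    let resp1 := PySem.List.slice resp (some (j + 3)) none
    let k := PySem.Chars.find resp1 pvNewline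
    if hk : k = -1 then
      result1
    else
      let resp2 := PySem.List.slice resp1 (some k) none
      let c := PySem.Chars.find resp2 pvFence
      if hc : c = -1 then
        result1
      else
        loopB (PySem.List.slice resp2 (some (c + 3)) none)
          (pvCode (PySem.List.slice resp2 none (some c)) result1)
termination_by resp.length
decreasing_by
  have hc' : ¬ PySem.Chars.find resp2 pvFence = -1 := hc
  have hc0 : (0:Int) ≤ PySem.Chars.find resp2 pvFence := by
    have := PySem.Chars.neg_one_le_find resp2 pvFence; omega
  have hinf := (PySem.Chars.find_nonneg_iff resp2 pvFence).mp hc0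
  have h3 : 3 ≤ resp2.length := by
    have := hinf.length_le; simpa [pvFence] using this
  have hA : (PySem.List.slice resp2 (some (PySem.Chars.find resp2 pvFence + 3)) none).length < resp2.length :=
    pv_len_slice_lt resp2 _ hc0 h3
  have hB : resp2.length ≤ resp1.length := pv_len_slice_le resp1 _
  have hC : resp1.length ≤ resp.length := pv_len_slice_le resp _
  exact lt_of_lt_of_le hA (hB.trans hC)

def extract_code_and_text_alt (response : String) : List (String × String) :=
  loopB response.toList []

-- ===== PRECONDITION & SPEC =====
def Spec_extract_code_and_text (response : String) (out : List (String × String)) : Prop := out = extract_code_and_text_alt response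
instance (response : String) (out : List (String × String)) : Decidable (Spec_extract_code_and_text response out) := by unfold Spec_extract_code_and_text; infer_instance

-- ===== CLAIM (what is proved, stated in full; the proofs are below) =====
def Claim_equal_extract_code_and_text : Prop := ∀ (response : String), Dom_extract_code_and_text response → Spec_extract_code_and_text response (extract_code_and_text response)

-- ===== LEMMAS AND PROOFS =====

-- what loopB does from a code block's body onward (proof-only abbreviation)
def pvCodeCont (s : List Char) (res : List (String × String)) : List (String × String) :=
  if PySem.Chars.find s pvFence = -1 then res
  else loopB (List.drop ((PySem.Chars.find s pvFence).toNat + 3) s)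
         (pvCode (List.take (PySem.Chars.find s pvFence).toNat s) res)

theorem pvMd_nil (res : List (String × String)) : pvMd [] res = res := rfl

theorem pv_noFence_find (s : List Char)
    (h : ∀ i, i < s.length → ¬ pvFence <+: s.drop i) :
    PySem.Chars.find s pvFence = -1 := by
  by_contra hne
  have h0 : (0:Int) ≤ PySem.Chars.find s pvFence := by
    have := PySem.Chars.neg_one_le_find s pvFence; omega
  obtain ⟨hpre, -⟩ := PySem.Chars.find_spec h0
  have hlen : 3 ≤ (s.drop (PySem.Chars.find s pvFence).toNat).length := by
    have := hpre.length_le; simpa [pvFence] using this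
  have hlt : (PySem.Chars.find s pvFence).toNat < s.length := by
    simp only [List.length_drop] at hlen; omega
  exact h _ hlt hpre

theorem pv_short_find (s : List Char) (h : s.length < 3) :
    PySem.Chars.find s pvFence = -1 := by
  rw [PySem.Chars.find_eq_neg_one_iff]
  intro hin
  have := hin.length_le
  simp [pvFence] at this
  omega

theorem pv_find_append (buffer resp : List Char)
    (hinv : ∀ i, i < buffer.length → ¬ pvFence <+: (buffer ++ resp).drop i)
    (h : pvFence <+: resp) :
    PySem.Chars.find (buffer ++ resp) pvFence = buffer.length := by
  have hin : pvFence <:+: buffer ++ resp :=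
    h.isInfix.trans (List.suffix_append buffer resp).isInfix
  have h0 : (0:Int) ≤ PySem.Chars.find (buffer ++ resp) pvFence :=
    (PySem.Chars.find_nonneg_iff _ _).mpr hin
  obtain ⟨hpre, hmin⟩ := PySem.Chars.find_spec h0
  have hnlt : ¬ ((PySem.Chars.find (buffer ++ resp) pvFence).toNat < buffer.length) :=
    fun hl => hinv _ hl hpre
  have hngt : ¬ (buffer.length < (PySem.Chars.find (buffer ++ resp) pvFence).toNat) := by
    intro hl
    exact hmin _ hl (by rw [List.drop_left]; exact h)
  omega

theorem pvCodeCont_eq (s : List Char) (res : List (String × String)) :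
    (if PySem.Chars.find s pvFence = -1 then res
     else loopB (PySem.List.slice s (some (PySem.Chars.find s pvFence + 3)) none)
            (pvCode (PySem.List.slice s none (some (PySem.Chars.find s pvFence))) res))
    = pvCodeCont s res := by
  by_cases h : PySem.Chars.find s pvFence = -1
  · simp [pvCodeCont, h]
  · have h0 : (0:Int) ≤ PySem.Chars.find s pvFence := by
      have := PySem.Chars.neg_one_le_find s pvFence; omega
    have e1 : PySem.List.slice s (some (PySem.Chars.find s pvFence + 3)) none
        = List.drop ((PySem.Chars.find s pvFence).toNat + 3) s := by
      rw [PySem.List.slice_from s (by omega : (0:Int) ≤ PySem.Chars.find s pvFence + 3)]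
      congr 1
      omega
    have e2 : PySem.List.slice s none (some (PySem.Chars.find s pvFence))
        = List.take (PySem.Chars.find s pvFence).toNat s :=
      PySem.List.slice_to s h0
    rw [if_neg h, pvCodeCont, if_neg h, e1, e2]

theorem pv_main_nil_md (buffer : List Char) (res : List (String × String))
    (hinv : ∀ i, i < buffer.length → ¬ pvFence <+: (buffer ++ ([]:List Char)).drop i) :
    loopA [] false buffer [] res = loopB (buffer ++ []) res := by
  have hf : PySem.Chars.find (buffer ++ ([]:List Char)) pvFence = -1 := by
    apply pv_noFence_find
    intro i hi
    exact hinv i (by simpa using hi)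
  rw [loopB, dif_pos hf]
  simp only [loopA]
  simp

theorem pv_main_nil_code (cbuf : List Char) (res : List (String × String))
    (hinv : ∀ i, i < cbuf.length → ¬ pvFence <+: (cbuf ++ ([]:List Char)).drop i) :
    loopA [] true [] cbuf res = pvCodeCont (cbuf ++ []) res := by
  have hf : PySem.Chars.find (cbuf ++ ([]:List Char)) pvFence = -1 := by
    apply pv_noFence_find
    intro i hi
    exact hinv i (by simpa using hi)
  rw [pvCodeCont, if_pos hf]
  simp only [loopA]
  exact pvMd_nil res

theorem pv_slice3 (xs : List Char) : PySem.List.slice xs (some 3) none = xs.drop 3 := by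
  rw [PySem.List.slice_from xs (by norm_num : (0:Int) ≤ 3), show ((3:Int)).toNat = 3 from rfl]

theorem pv_drop_append (l1 l2 : List Char) (n : Nat) :
    (l1 ++ l2).drop (l1.length + n) = l2.drop n := by
  simp [List.drop_append]

theorem pv_fence_len (resp : List Char) (h : pvFence <+: resp) : 3 ≤ resp.length := by
  have := h.length_le; simpa [pvFence] using this

-- one step of each loop, in the shape the induction uses
theorem pv_loopA_open (c : Char) (rest buffer codeBuffer : List Char) (res : List (String × String))
    (hsw : PySem.Chars.startswith (c :: rest) pvFence = true) :
    loopA (c :: rest) false buffer codeBuffer res =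
      loopA (PySem.List.slice ((c :: rest).drop 3)
          (some (PySem.Chars.find ((c :: rest).drop 3) pvNewline)) none)
        true [] codeBuffer (pvMd buffer res) := by
  simp only [loopA]
  rw [dif_pos (by simp [hsw] : (!false && PySem.Chars.startswith (c :: rest) pvFence) = true)]
  simp only [pv_slice3]

theorem pv_loopA_skip_md (c : Char) (rest buffer codeBuffer : List Char) (res : List (String × String))
    (hsw : PySem.Chars.startswith (c :: rest) pvFence = false) :
    loopA (c :: rest) false buffer codeBuffer res = loopA rest false (buffer ++ [c]) codeBuffer res := by
  simp only [loopA]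
  simp [hsw]

theorem pv_loopA_close (c : Char) (rest buffer codeBuffer : List Char) (res : List (String × String))
    (hsw : PySem.Chars.startswith (c :: rest) pvFence = true) :
    loopA (c :: rest) true buffer codeBuffer res =
      loopA ((c :: rest).drop 3) false buffer [] (pvCode codeBuffer res) := by
  simp only [loopA]
  rw [dif_neg (by simp : ¬ ((!true && PySem.Chars.startswith (c :: rest) pvFence) = true)),
      dif_pos (by simp [hsw] : (true && PySem.Chars.startswith (c :: rest) pvFence) = true)]
  simp only [pv_slice3]

theorem pv_loopA_skip_code (c : Char) (rest buffer codeBuffer : List Char) (res : List (String × String))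
    (hsw : PySem.Chars.startswith (c :: rest) pvFence = false) :
    loopA (c :: rest) true buffer codeBuffer res = loopA rest true buffer (codeBuffer ++ [c]) res := by
  simp only [loopA]
  simp [hsw]

theorem pv_loopB_step (buffer resp : List Char) (res : List (String × String))
    (hfind : PySem.Chars.find (buffer ++ resp) pvFence = buffer.length) :
    loopB (buffer ++ resp) res =
      if PySem.Chars.find (resp.drop 3) pvNewline = -1 then pvMd buffer res
      else pvCodeCont ((resp.drop 3).drop (PySem.Chars.find (resp.drop 3) pvNewline).toNat)
             (pvMd buffer res) := by
  have e0 : ¬ ((buffer.length : Int) = -1) := by omega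
  have e1 : PySem.List.slice (buffer ++ resp) none (some (buffer.length : Int)) = buffer := by
    rw [PySem.List.slice_to _ (by omega : (0:Int) ≤ (buffer.length : Int)), Int.toNat_natCast,
        List.take_left]
  have e2 : PySem.List.slice (buffer ++ resp) (some ((buffer.length : Int) + 3)) none = resp.drop 3 := by
    rw [PySem.List.slice_from _ (by omega : (0:Int) ≤ (buffer.length : Int) + 3),
        show ((buffer.length : Int) + 3).toNat = buffer.length + 3 by omega,
        pv_drop_append]
  rw [loopB]
  simp only [hfind, dite_eq_ite, e1, e2]
  rw [if_neg e0]
  by_cases hk : PySem.Chars.find (resp.drop 3) pvNewline = -1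
  · simp only [if_pos hk]
  · simp only [if_neg hk]
    have hk0 : (0:Int) ≤ PySem.Chars.find (resp.drop 3) pvNewline := by
      have := PySem.Chars.neg_one_le_find (resp.drop 3) pvNewline; omega
    have e3 : PySem.List.slice (resp.drop 3) (some (PySem.Chars.find (resp.drop 3) pvNewline)) none
        = (resp.drop 3).drop (PySem.Chars.find (resp.drop 3) pvNewline).toNat :=
      PySem.List.slice_from _ hk0
    simp only [e3]
    rw [pvCodeCont_eq]

theorem pv_main : ∀ n : Nat, ∀ resp : List Char, resp.length ≤ n →
    (∀ buffer res, (∀ i, i < buffer.length → ¬ pvFence <+: (buffer ++ resp).drop i) →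
      loopA resp false buffer [] res = loopB (buffer ++ resp) res) ∧
    (∀ cbuf res, (∀ i, i < cbuf.length → ¬ pvFence <+: (cbuf ++ resp).drop i) →
      loopA resp true [] cbuf res = pvCodeCont (cbuf ++ resp) res) := by
  intro n
  induction n with
  | zero =>
    intro resp hlen
    have hnil : resp = [] := List.eq_nil_of_length_eq_zero (Nat.le_zero.mp hlen)
    subst hnil
    exact ⟨fun buffer res hinv => pv_main_nil_md buffer res hinv,
           fun cbuf res hinv => pv_main_nil_code cbuf res hinv⟩
  | succ n ih =>
    intro resp hlen
    rcases resp with _ | ⟨c, rest⟩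
    · exact ⟨fun buffer res hinv => pv_main_nil_md buffer res hinv,
             fun cbuf res hinv => pv_main_nil_code cbuf res hinv⟩
    simp only [List.length_cons] at hlen
    constructor
    · intro buffer res hinv
      by_cases hsw : PySem.Chars.startswith (c :: rest) pvFence = true
      · -- a fence opens a code block here
        have hpre : pvFence <+: (c :: rest) := (PySem.Chars.startswith_iff _ _).mp hsw
        have hlen3 : 3 ≤ (c :: rest).length := pv_fence_len _ hpre
        simp only [List.length_cons] at hlen3
        have hfind : PySem.Chars.find (buffer ++ (c :: rest)) pvFence = buffer.length :=
          pv_find_append buffer (c :: rest) hinv hpre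
        rw [pv_loopA_open c rest buffer [] res hsw, pv_loopB_step buffer (c :: rest) res hfind]
        by_cases hL : PySem.Chars.find ((c :: rest).drop 3) pvNewline = -1
        · rw [if_pos hL, hL, PySem.List.slice_from_neg_one]
          have hsub : (((c :: rest).drop 3).drop (((c :: rest).drop 3).length - 1)).length ≤ n := by
            simp only [List.length_drop, List.length_cons]
            omega
          have hcode := (ih _ hsub).2 [] (pvMd buffer res) (by intro i hi; simp at hi)
          rw [List.nil_append] at hcode
          rw [hcode, pvCodeCont,
              if_pos (pv_short_find _ (by simp only [List.length_drop]; omega))]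
        · rw [if_neg hL]
          have hL0 : (0:Int) ≤ PySem.Chars.find ((c :: rest).drop 3) pvNewline := by
            have := PySem.Chars.neg_one_le_find ((c :: rest).drop 3) pvNewline; omega
          rw [PySem.List.slice_from _ hL0]
          have hsub : (((c :: rest).drop 3).drop
              (PySem.Chars.find ((c :: rest).drop 3) pvNewline).toNat).length ≤ n := by
            simp only [List.length_drop, List.length_cons]
            omega
          have hcode := (ih _ hsub).2 [] (pvMd buffer res) (by intro i hi; simp at hi)
          rw [List.nil_append] at hcode
          rw [hcode]
      · -- ordinary markdown character
        have hsw' : PySem.Chars.startswith (c :: rest) pvFence = false := by simpa using hsw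
        have hs : (buffer ++ [c]) ++ rest = buffer ++ (c :: rest) := by simp
        have hinv' : ∀ i, i < (buffer ++ [c]).length →
            ¬ pvFence <+: ((buffer ++ [c]) ++ rest).drop i := by
          intro i hi
          rw [hs]
          simp only [List.length_append, List.length_cons, List.length_nil] at hi
          by_cases hib : i < buffer.length
          · exact hinv i hib
          · have hieq : i = buffer.length := by omega
            subst hieq
            rw [List.drop_left]
            intro hp
            exact hsw ((PySem.Chars.startswith_iff _ _).mpr hp)
        have hmd := (ih rest (by omega)).1 (buffer ++ [c]) res hinv'
        rw [pv_loopA_skip_md c rest buffer [] res hsw', hmd, hs]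
    · intro cbuf res hinv
      by_cases hsw : PySem.Chars.startswith (c :: rest) pvFence = true
      · -- the closing fence of the code block
        have hpre : pvFence <+: (c :: rest) := (PySem.Chars.startswith_iff _ _).mp hsw
        have hfind : PySem.Chars.find (cbuf ++ (c :: rest)) pvFence = cbuf.length :=
          pv_find_append cbuf (c :: rest) hinv hpre
        rw [pv_loopA_close c rest [] cbuf res hsw]
        have hmd := (ih ((c :: rest).drop 3)
            (by simp only [List.length_drop, List.length_cons]; omega)).1 []
          (pvCode cbuf res) (by intro i hi; simp at hi)
        rw [List.nil_append] at hmd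
        rw [hmd, pvCodeCont, hfind, if_neg (by omega : ¬ ((cbuf.length : Int) = -1)),
            Int.toNat_natCast, pv_drop_append, List.take_left]
      · -- ordinary code character
        have hsw' : PySem.Chars.startswith (c :: rest) pvFence = false := by simpa using hsw
        have hs : (cbuf ++ [c]) ++ rest = cbuf ++ (c :: rest) := by simp
        have hinv' : ∀ i, i < (cbuf ++ [c]).length →
            ¬ pvFence <+: ((cbuf ++ [c]) ++ rest).drop i := by
          intro i hi
          rw [hs]
          simp only [List.length_append, List.length_cons, List.length_nil] at hi
          by_cases hib : i < cbuf.length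
          · exact hinv i hib
          · have hieq : i = cbuf.length := by omega
            subst hieq
            rw [List.drop_left]
            intro hp
            exact hsw ((PySem.Chars.startswith_iff _ _).mpr hp)
        have hcd := (ih rest (by omega)).2 (cbuf ++ [c]) res hinv'
        rw [pv_loopA_skip_code c rest [] cbuf res hsw', hcd, hs]

-- ===== VERDICT (by name: the statement is the Claim_ definition above) =====
theorem extract_code_and_text_spec : Claim_equal_extract_code_and_text := by
  intro response _
  unfold Spec_extract_code_and_text extract_code_and_text extract_code_and_text_alt
  have h := (pv_main response.toList.length response.toList le_rfl).1 [] [] (by simp)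
  simpa using h
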